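-- pv_equiv track=rewrite | github.com/William-Yao-2000/Deformable-DETR-Bezier | inference_visualization_batch.py | get_gt_lst
-- ===== SOURCE A (Python) =====
-- def get_gt_lst(text_lst):
--     gt_res_lst = []
--     cnt = 0
--     for word in text_lst:
--         sub_lst = []
--         for c in word:
--             if c not in (' ', '\t', '\n'):
--                 sub_lst.append(cnt)
--                 cnt += 1
--         gt_res_lst.append(sub_lst)
--     return gt_res_lst
-- ===== SOURCE B (Python) =====
-- def get_gt_lst(text_lst):
--     # Stage 1: flatten to a stream of word-ids, one per non-whitespace char.
--     flat = [i for i, word in enumerate(text_lst)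
--               for c in word if c not in (' ', '\t', '\n')]
--     # Stage 2: the global index of each such char is its position in the
--     # flat stream; bucket the positions by word id.
--     buckets = [[] for _ in text_lst]
--     for pos, wid in enumerate(flat):
--         buckets[wid].append(pos)
--     return buckets
-- ===== Notes on version B (the rewrite author's own statement) =====
-- stated objective: alternative
-- what changed: B keeps no running counter: it first flattens the input to a stream of word-ids (one per non-whitespace char), then derives each index as that char's position in the flat stream via enumerate and buckets the positions by word id.
import Mathlib
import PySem

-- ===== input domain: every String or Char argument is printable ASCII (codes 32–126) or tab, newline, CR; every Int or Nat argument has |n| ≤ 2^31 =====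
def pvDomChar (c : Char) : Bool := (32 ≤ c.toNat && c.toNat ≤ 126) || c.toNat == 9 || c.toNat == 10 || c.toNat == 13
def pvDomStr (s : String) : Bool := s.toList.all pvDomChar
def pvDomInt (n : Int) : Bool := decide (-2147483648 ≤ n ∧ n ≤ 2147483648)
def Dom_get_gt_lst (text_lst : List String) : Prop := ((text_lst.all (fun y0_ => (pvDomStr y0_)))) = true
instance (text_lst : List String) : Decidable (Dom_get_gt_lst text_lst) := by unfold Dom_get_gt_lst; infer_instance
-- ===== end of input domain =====

-- B replaces A's running counter by a two-stage flatten-then-bucket construction (alternative decomposition).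

-- "c not in (' ', '\t', '\n')" — the exact whitespace-tuple test shared by both Pythons
def pvNonWS (c : Char) : Bool := !(c == ' ' || c == '\t' || c == '\n')

-- ===== PORT A =====
-- inner loop of A: for c in word, append cnt and increment on non-whitespace
def pvAInner (word : List Char) (st : List Int × Int) : List Int × Int :=
  word.foldl (fun (p : List Int × Int) c =>
    if pvNonWS c then (p.1 ++ [p.2], p.2 + 1) else p) st

def get_gt_lst (text_lst : List String) : List (List Int) :=
  (text_lst.foldl (fun (p : List (List Int) × Int) word =>
    let r := pvAInner word.toList ([], p.2)
    (p.1 ++ [r.1], r.2)) ([], 0)).1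

-- ===== PORT B =====
-- flat = [i for i, word in enumerate(text_lst) for c in word if c not in (' ', '\t', '\n')]
def pvFlat (text_lst : List String) : List Int :=
  (PySem.List.enumerate text_lst 0).flatMap
    (fun q => (q.2.toList.filter pvNonWS).map (fun _ => q.1))

-- buckets = [[] for _ in text_lst]; for pos, wid in enumerate(flat): buckets[wid].append(pos)
-- buckets[wid] with wid a non-negative int from enumerate → List.modify at wid.toNat (exact here)
def get_gt_lst_alt (text_lst : List String) : List (List Int) :=
  (PySem.List.enumerate (pvFlat text_lst) 0).foldl
    (fun (bs : List (List Int)) q => bs.modify q.2.toNat (fun l => l ++ [q.1]))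
    (text_lst.map (fun _ => ([] : List Int)))

-- ===== PRECONDITION & SPEC =====
def Spec_get_gt_lst (text_lst : List String) (out : List (List Int)) : Prop := out = get_gt_lst_alt text_lst
instance (text_lst : List String) (out : List (List Int)) : Decidable (Spec_get_gt_lst text_lst out) := by unfold Spec_get_gt_lst; infer_instance

-- ===== CLAIM =====
def Claim_equal_get_gt_lst : Prop := ∀ (text_lst : List String), Dom_get_gt_lst text_lst → Spec_get_gt_lst text_lst (get_gt_lst text_lst)

-- ===== LEMMAS AND PROOFS =====

-- reference: the word at offset cnt contributes [cnt, cnt+m) where m = its non-whitespace count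
def pvRng (cnt : Int) (m : Nat) : List Int := (List.range m).map (fun i => cnt + Int.ofNat i)

def pvRef (cnt : Int) : List String → List (List Int)
  | [] => []
  | w :: ws =>
    let m := (w.toList.filter pvNonWS).length
    pvRng cnt m :: pvRef (cnt + (m : Int)) ws

theorem pvRng_succ_front (cnt : Int) (m : Nat) : pvRng cnt (m + 1) = cnt :: pvRng (cnt + 1) m := by
  unfold pvRng
  rw [List.range_succ_eq_map, List.map_cons, List.map_map]
  norm_num
  intro a _
  ring

-- A-side: the char loop appends one contiguous block and advances the counter
theorem pvAInner_eq (word : List Char) (sub : List Int) (cnt : Int) :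
    pvAInner word (sub, cnt) =
      (sub ++ pvRng cnt (word.filter pvNonWS).length,
       cnt + ((word.filter pvNonWS).length : Int)) := by
  induction word generalizing sub cnt with
  | nil => simp [pvAInner, pvRng]
  | cons c cs ih =>
    by_cases h : pvNonWS c
    · have := ih (sub ++ [cnt]) (cnt + 1)
      simp only [pvAInner, List.foldl_cons, h, if_true] at this ⊢
      rw [this, List.filter_cons_of_pos h, List.length_cons]
      rw [pvRng_succ_front]
      simp only [Prod.mk.injEq, List.append_assoc, List.singleton_append, Nat.cast_add, Nat.cast_one]
      refine ⟨by simp, by ring⟩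
    · have := ih sub cnt
      simp only [pvAInner, List.foldl_cons, h, if_false, Bool.false_eq_true] at this ⊢
      rw [this, List.filter_cons_of_neg (by simp [h])]

-- A's outer fold produces pvRef
theorem A_eq_ref (ws : List String) (acc : List (List Int)) (cnt : Int) :
    (ws.foldl (fun (p : List (List Int) × Int) word =>
      let r := pvAInner word.toList ([], p.2)
      (p.1 ++ [r.1], r.2)) (acc, cnt)).1 = acc ++ pvRef cnt ws := by
  induction ws generalizing acc cnt with
  | nil => simp [pvRef]
  | cons w ws ih =>
    simp only [List.foldl_cons]
    rw [pvAInner_eq]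
    simp only [List.nil_append]
    rw [ih]
    simp [pvRef]

-- modify at the length of the left part edits the head of the right part
theorem modify_at_length {α : Type} (l1 : List α) (x : α) (l2 : List α) (f : α → α) :
    (l1 ++ x :: l2).modify l1.length f = l1 ++ f x :: l2 := by
  induction l1 with
  | nil => simp [List.modify_cons]
  | cons a l ih => simp [ih]

-- one word's pairs: positions p, p+1, … appended into bucket #done.length
theorem word_fold (m : Nat) (p : Int) (done : List (List Int)) (cur : List Int) (rest : List (List Int)) :
    (PySem.List.enumerate (List.replicate m ((done.length : Int))) p).foldl
      (fun (bs : List (List Int)) q => bs.modify q.2.toNat (fun l => l ++ [q.1]))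
      (done ++ cur :: rest)
    = done ++ (cur ++ pvRng p m) :: rest := by
  induction m generalizing p cur with
  | zero => simp [pvRng]
  | succ m ih =>
    rw [List.replicate_succ, PySem.List.enumerate_cons, List.foldl_cons]
    simp only [Int.toNat_natCast]
    rw [modify_at_length, ih (p + 1) (cur ++ [p])]
    rw [pvRng_succ_front]
    simp

-- B's bucket fold produces pvRef, word by word
theorem B_eq_ref (ws : List String) (done : List (List Int)) (p : Int) :
    (PySem.List.enumerate
        ((PySem.List.enumerate ws ((done.length : Int))).flatMap
          (fun q => (q.2.toList.filter pvNonWS).map (fun _ => q.1))) p).foldl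
      (fun (bs : List (List Int)) q => bs.modify q.2.toNat (fun l => l ++ [q.1]))
      (done ++ ws.map (fun _ => ([] : List Int)))
    = done ++ pvRef p ws := by
  induction ws generalizing done p with
  | nil => simp [PySem.List.enumerate, pvRef]
  | cons w ws ih =>
    rw [PySem.List.enumerate_cons, List.flatMap_cons]
    have hmap : (w.toList.filter pvNonWS).map (fun _ => ((done.length : Int)))
        = List.replicate (w.toList.filter pvNonWS).length ((done.length : Int)) := by
      simp
    rw [hmap, PySem.List.enumerate_append, List.foldl_append]
    simp only [List.map_cons]
    rw [word_fold, List.nil_append]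
    have : done ++ pvRng p (w.toList.filter pvNonWS).length :: ws.map (fun _ => ([] : List Int))
        = (done ++ [pvRng p (w.toList.filter pvNonWS).length]) ++ ws.map (fun _ => ([] : List Int)) := by
      simp
    rw [this]
    have hlen : ((done ++ [pvRng p (w.toList.filter pvNonWS).length]).length : Int)
        = (done.length : Int) + 1 := by simp
    rw [← hlen, ih, List.length_replicate]
    simp [pvRef]

-- ===== VERDICT =====
theorem get_gt_lst_spec : Claim_equal_get_gt_lst := by
  intro text_lst _
  unfold Spec_get_gt_lst get_gt_lst get_gt_lst_alt pvFlat
  rw [A_eq_ref]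
  have := B_eq_ref text_lst [] 0
  simpa using this.symm
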